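-- pv_equiv track=rewrite | github.com/DataQuality18/data-pipeline-project | Linege/sql_lineage_parserr.py | split_sql_columns
-- ===== SOURCE A (Python) =====
-- from typing import List, Dict, Union, Optional
--
-- def split_sql_columns(select_clause: str) -> List[str]:
--     """Split SQL SELECT clause into individual column expressions"""
--     columns = []
--     current = ""
--     paren_depth = 0
--     in_quotes = False
--     quote_char = None
--
--     for char in select_clause:
--         if char in ['"', "'"] and not in_quotes:
--             in_quotes = True
--             quote_char = char
--         elif char == quote_char and in_quotes:
--             in_quotes = False
--             quote_char = None
--         elif char == '(' and not in_quotes: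
--             paren_depth += 1
--         elif char == ')' and not in_quotes:
--             paren_depth -= 1
--         elif char == ',' and paren_depth == 0 and not in_quotes:
--             if current.strip():
--                 columns.append(current.strip())
--             current = ""
--             continue
--
--         current += char
--
--     if current.strip():
--         columns.append(current.strip())
--
--     return columns
-- ===== SOURCE B (Python) =====
-- def _top_level_comma(s):
--     """Index of the first comma at paren depth 0 outside quotes, or None.
--
--     Quoted spans are skipped wholesale with str.find instead of per-char state;
--     an unclosed quote swallows the rest of the string (no comma can follow it).
--     """
--     depth = 0
--     i = 0
--     n = len(s)
--     while i < n:
--         c = s[i]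
--         if c == '"' or c == "'":
--             j = s.find(c, i + 1)
--             if j == -1:
--                 return None
--             i = j + 1
--         elif c == ',' and depth == 0:
--             return i
--         else:
--             if c == '(':
--                 depth += 1
--             elif c == ')':
--                 depth -= 1
--             i += 1
--     return None
--
--
-- def split_sql_columns(select_clause):
--     """Split SQL SELECT clause into individual column expressions.
--
--     Recursive splitter: locate the first top-level comma, slice the head off,
--     recurse on the remainder; strip each piece and drop empty ones.
--     """
--     i = _top_level_comma(select_clause)
--     if i is None:
--         head = select_clause.strip()
--         return [head] if head else []
--     head = select_clause[:i].strip()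
--     tail = split_sql_columns(select_clause[i + 1:])
--     return ([head] if head else []) + tail
-- ===== Notes on version B (the rewrite author's own statement) =====
-- stated objective: alternative
-- what changed: B is a recursive splitter built on a find-next-delimiter helper: it locates the first top-level comma (skipping entire quoted spans with str.find instead of per-char quote state), slices the head off with s[:i]/s[i+1:], and recurses on the remainder, whereas A is a single-pass character state machine accumulating a current string; both strip pieces and drop empty ones.
import Mathlib
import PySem

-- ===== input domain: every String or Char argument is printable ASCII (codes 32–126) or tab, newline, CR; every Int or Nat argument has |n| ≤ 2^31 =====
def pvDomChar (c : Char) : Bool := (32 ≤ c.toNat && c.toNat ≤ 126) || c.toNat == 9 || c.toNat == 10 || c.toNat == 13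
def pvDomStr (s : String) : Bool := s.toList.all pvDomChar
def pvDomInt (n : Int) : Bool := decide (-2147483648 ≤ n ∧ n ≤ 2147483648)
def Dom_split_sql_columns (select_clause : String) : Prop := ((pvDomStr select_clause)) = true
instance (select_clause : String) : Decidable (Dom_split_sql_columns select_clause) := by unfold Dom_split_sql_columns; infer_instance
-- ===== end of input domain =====

-- B replaces A's single-pass state-machine accumulator by a recursive splitter: a helper
-- finds the first top-level comma (skipping quoted spans wholesale with str.find), the head
-- is sliced off and stripped, and the function recurses on the remainder; objective: alternative.


-- ===== PORT A =====
-- loop body of A's `for char in select_clause`; state = (columns, current, paren_depth, in_quotes, quote_char)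
def pvStepA (st : List String × List Char × Int × Bool × Option Char) (char : Char) :
    List String × List Char × Int × Bool × Option Char :=
  let (columns, current, paren_depth, in_quotes, quote_char) := st
  if (char = '"' ∨ char = '\'') ∧ ¬in_quotes then
    (columns, current ++ [char], paren_depth, true, some char)
  else if quote_char = some char ∧ in_quotes then
    (columns, current ++ [char], paren_depth, false, none)
  else if char = '(' ∧ ¬in_quotes then
    (columns, current ++ [char], paren_depth + 1, in_quotes, quote_char)
  else if char = ')' ∧ ¬in_quotes then
    (columns, current ++ [char], paren_depth - 1, in_quotes, quote_char)
  else if char = ',' ∧ paren_depth = 0 ∧ ¬in_quotes then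
    -- `continue`: comma not appended, current flushed if its strip is truthy
    ((if PySem.Chars.strip current ≠ [] then columns ++ [String.ofList (PySem.Chars.strip current)] else columns),
      [], paren_depth, in_quotes, quote_char)
  else
    (columns, current ++ [char], paren_depth, in_quotes, quote_char)

def split_sql_columns (select_clause : String) : List String :=
  let st := select_clause.toList.foldl pvStepA ([], [], 0, false, none)
  let (columns, current, _, _, _) := st
  if PySem.Chars.strip current ≠ [] then columns ++ [String.ofList (PySem.Chars.strip current)]
  else columns

-- ===== PORT B =====
-- port of Source B's `_top_level_comma`: the while loop over index i with depth becomes a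
-- fuel-indexed structural recursion (fuel s.length - i only makes it total: i strictly
-- increases each iteration, so the fuel never runs out while i < len(s)); quoted spans are
-- skipped via s.find(c, i + 1) (PySem.Chars.findFrom; Python's -1 is the Int -1 here,
-- `return None` is `none`)
def pvTopCommaF : Nat → List Char → Nat → Int → Option Nat
  | 0, _, _, _ => none
  | n + 1, s, i, depth =>
    if h : i < s.length then
      if s[i] = '"' ∨ s[i] = '\'' then
        if PySem.Chars.findFrom s [s[i]] ((i + 1 : Nat) : Int) = -1 then none
        else pvTopCommaF n s ((PySem.Chars.findFrom s [s[i]] ((i + 1 : Nat) : Int)).toNat + 1) depth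
      else if s[i] = ',' ∧ depth = 0 then some i
      else pvTopCommaF n s (i + 1) (if s[i] = '(' then depth + 1 else if s[i] = ')' then depth - 1 else depth)
    else none

def pvTopComma (s : List Char) (i : Nat) (depth : Int) : Option Nat :=
  pvTopCommaF (s.length - i) s i depth

-- port of Source B's recursive `split_sql_columns`: s[:i] / s[i+1:] are take/drop (i ≥ 0, exact);
-- the recursion on the strictly shorter tail is again made structural by a length fuel
def pvSplitBF : Nat → List Char → List String
  | 0, _ => []
  | n + 1, s =>
    match pvTopComma s 0 0 with
    | none =>
        let head := PySem.Chars.strip s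
        if head ≠ [] then [String.ofList head] else []
    | some i =>
        let head := PySem.Chars.strip (s.take i)
        (if head ≠ [] then [String.ofList head] else []) ++ pvSplitBF n (s.drop (i + 1))

def split_sql_columns_alt (select_clause : String) : List String :=
  pvSplitBF (select_clause.toList.length + 1) select_clause.toList

-- ===== PRECONDITION & SPEC =====
def Spec_split_sql_columns (select_clause : String) (out : List String) : Prop := out = split_sql_columns_alt select_clause
instance (select_clause : String) (out : List String) : Decidable (Spec_split_sql_columns select_clause out) := by unfold Spec_split_sql_columns; infer_instance

-- ===== CLAIM (what is proved, stated in full; the proofs are below) =====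
def Claim_equal_split_sql_columns : Prop := ∀ (select_clause : String), Dom_split_sql_columns select_clause → Spec_split_sql_columns select_clause (split_sql_columns select_clause)

-- ===== LEMMAS AND PROOFS =====

/-- the raw segments A's loop cuts `cs` into, starting with open segment `cur` and state (d, quote). -/
def pvSegs : List Char → List Char → Int → Option Char → List (List Char)
  | [], cur, _, _ => [cur]
  | c :: cs, cur, d, none =>
    if c = '"' ∨ c = '\'' then pvSegs cs (cur ++ [c]) d (some c)
    else if c = '(' then pvSegs cs (cur ++ [c]) (d + 1) none
    else if c = ')' then pvSegs cs (cur ++ [c]) (d - 1) none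
    else if c = ',' ∧ d = 0 then cur :: pvSegs cs [] d none
    else pvSegs cs (cur ++ [c]) d none
  | c :: cs, cur, d, some q =>
    if c = q then pvSegs cs (cur ++ [c]) d none
    else pvSegs cs (cur ++ [c]) d (some q)

def pvStripNE (seg : List Char) : Option String :=
  if PySem.Chars.strip seg ≠ [] then some (String.ofList (PySem.Chars.strip seg)) else none

/-- A's loop + final flush computes exactly the strip-filtered segments. -/
lemma pvFoldA_segs (cs : List Char) : ∀ (cols : List String) (cur : List Char) (d : Int) (q : Option Char),
    (let st := cs.foldl pvStepA (cols, cur, d, q.isSome, q)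
     if PySem.Chars.strip st.2.1 ≠ [] then st.1 ++ [String.ofList (PySem.Chars.strip st.2.1)] else st.1)
      = cols ++ (pvSegs cs cur d q).filterMap pvStripNE := by
  induction cs with
  | nil =>
    intro cols cur d q
    by_cases h : PySem.Chars.strip cur ≠ [] <;>
      simp [pvSegs, pvStripNE, h]
  | cons c cs ih =>
    intro cols cur d q
    cases q with
    | none =>
      by_cases h1 : c = '"' ∨ c = '\''
      · simpa [pvStepA, pvSegs, h1] using ih cols (cur ++ [c]) d (some c)
      · by_cases h2 : c = '('
        · simpa [pvStepA, pvSegs, h1, h2] using ih cols (cur ++ [c]) (d + 1) none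
        · by_cases h3 : c = ')'
          · simpa [pvStepA, pvSegs, h1, h2, h3] using ih cols (cur ++ [c]) (d - 1) none
          · by_cases h4 : c = ',' ∧ d = 0
            · by_cases h5 : PySem.Chars.strip cur ≠ []
              · simpa [pvStepA, pvSegs, h1, h2, h3, h4, h5, pvStripNE, List.filterMap_cons]
                  using ih (cols ++ [String.ofList (PySem.Chars.strip cur)]) [] d none
              · simpa [pvStepA, pvSegs, h1, h2, h3, h4, h5, pvStripNE, List.filterMap_cons]
                  using ih cols [] d none
            · simpa [pvStepA, pvSegs, h1, h2, h3, h4] using ih cols (cur ++ [c]) d none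
    | some qc =>
      by_cases h : c = qc
      · simpa [pvStepA, pvSegs, h] using ih cols (cur ++ [c]) d none
      · have h' : ¬qc = c := fun e => h e.symm
        simpa [pvStepA, pvSegs, h, h'] using ih cols (cur ++ [c]) d (some qc)

/-- inside quotes, pvSegs just appends chars until the matching quote. -/
lemma pvSegs_quote_skip (u : List Char) : ∀ (q : Char) (v cur : List Char) (d : Int), q ∉ u →
    pvSegs (u ++ q :: v) cur d (some q) = pvSegs v (cur ++ u ++ [q]) d none := by
  induction u with
  | nil => intro q v cur d _; simp [pvSegs]
  | cons x xs ih =>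
    intro q v cur d h
    have hx : ¬x = q := fun e => h (by simp [e])
    have hxs : q ∉ xs := fun e => h (by simp [e])
    simp only [List.cons_append, pvSegs, if_neg hx]
    rw [ih q v (cur ++ [x]) d hxs]
    simp

/-- an unclosed quote swallows the rest: one final segment. -/
lemma pvSegs_quote_all (t : List Char) : ∀ (q : Char) (cur : List Char) (d : Int), q ∉ t →
    pvSegs t cur d (some q) = [cur ++ t] := by
  induction t with
  | nil => intro q cur d _; simp [pvSegs]
  | cons x xs ih =>
    intro q cur d h
    have hx : ¬x = q := fun e => h (by simp [e])
    have hxs : q ∉ xs := fun e => h (by simp [e])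
    simp only [pvSegs, if_neg hx]
    rw [ih q (cur ++ [x]) d hxs]
    simp

/-- decomposition of the quoted span found by findFrom. -/
lemma pvFind_decomp (s : List Char) (c : Char) (i : Nat) (hi : i + 1 ≤ s.length)
    (hne : PySem.Chars.findFrom s [c] ((i + 1 : Nat) : Int) ≠ -1) :
    ∃ u v, s.drop (i + 1) = u ++ c :: v ∧ c ∉ u ∧
      (PySem.Chars.findFrom s [c] ((i + 1 : Nat) : Int)).toNat = i + 1 + u.length := by
  obtain ⟨hk, hpre, hmin⟩ := PySem.Chars.findFrom_natCast_spec s [c] (i + 1) hi hne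
  set m := (PySem.Chars.findFrom s [c] ((i + 1 : Nat) : Int)).toNat with hm
  have him : i + 1 ≤ m := by omega
  have hmlt : m < s.length := by
    by_contra hge
    have : s.drop m = [] := List.drop_eq_nil_of_le (by omega)
    rw [this] at hpre
    exact absurd (List.eq_nil_of_prefix_nil hpre) (by simp)
  refine ⟨(s.drop (i + 1)).take (m - (i + 1)), s.drop (m + 1), ?_, ?_, ?_⟩
  · have hsm : s.drop m = c :: s.drop (m + 1) := by
      obtain ⟨t, ht⟩ := hpre
      rw [List.drop_eq_getElem_cons hmlt] at ht
      simp only [List.singleton_append, List.cons.injEq] at ht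
      rw [List.drop_eq_getElem_cons hmlt, ← ht.1]
    calc s.drop (i + 1)
        = (s.drop (i + 1)).take (m - (i + 1)) ++ (s.drop (i + 1)).drop (m - (i + 1)) := by
          simp
      _ = (s.drop (i + 1)).take (m - (i + 1)) ++ c :: s.drop (m + 1) := by
          simp only [List.drop_drop]
          rw [show i + 1 + (m - (i + 1)) = m from by omega, hsm]
  · intro hmem
    obtain ⟨l, hl, hgl⟩ := List.mem_iff_getElem.mp hmem
    have hlen : l < m - (i + 1) := by
      have := hl
      simpa using lt_of_lt_of_le hl (by simp [List.length_take])
    have hlt : i + 1 + l < s.length := by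
      have : m - (i + 1) ≤ s.length - (i + 1) := by omega
      omega
    have hchar : s[i + 1 + l] = c := by
      have := hgl
      rw [List.getElem_take, List.getElem_drop] at this
      exact this
    have : [c] <+: s.drop (i + 1 + l) := by
      rw [List.drop_eq_getElem_cons hlt, hchar]
      exact ⟨_, rfl⟩
    exact hmin (i + 1 + l) (by omega) (by omega) this
  · have : ((s.drop (i + 1)).take (m - (i + 1))).length = m - (i + 1) := by
      simp [List.length_take]
      omega
    omega

lemma pvFind_none (s : List Char) (c : Char) (i : Nat) (hi : i + 1 ≤ s.length)
    (h : PySem.Chars.findFrom s [c] ((i + 1 : Nat) : Int) = -1) : c ∉ s.drop (i + 1) := by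
  intro hmem
  have hninf := (PySem.Chars.findFrom_natCast_eq_neg_one_iff s [c] (i + 1) hi).mp h
  obtain ⟨p, q, hpq⟩ := List.append_of_mem hmem
  rw [hpq] at hninf
  exact hninf ⟨p, q, by simp⟩

lemma pvTopCommaF_none (m : Nat) (s : List Char) (i : Nat) (d : Int) (h : s.length ≤ i) :
    pvTopCommaF m s i d = none := by
  cases m with
  | zero => rfl
  | succ m => rw [pvTopCommaF, dif_neg (by omega)]

/-- any sufficient fuel computes the same answer. -/
lemma pvTopCommaF_fuel : ∀ (n m : Nat) (s : List Char) (i : Nat) (d : Int),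
    s.length - i ≤ n → s.length - i ≤ m → pvTopCommaF n s i d = pvTopCommaF m s i d := by
  intro n
  induction n with
  | zero =>
    intro m s i d hn hm
    rw [pvTopCommaF_none 0 s i d (by omega), pvTopCommaF_none m s i d (by omega)]
  | succ n ih =>
    intro m s i d hn hm
    by_cases hlt : i < s.length
    · obtain ⟨m', rfl⟩ : ∃ m', m = m' + 1 := ⟨m - 1, by omega⟩
      rw [pvTopCommaF, pvTopCommaF, dif_pos hlt, dif_pos hlt]
      by_cases hq : s[i] = '"' ∨ s[i] = '\''
      · rw [if_pos hq, if_pos hq]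
        by_cases hj : PySem.Chars.findFrom s [s[i]] ((i + 1 : Nat) : Int) = -1
        · rw [if_pos hj, if_pos hj]
        · rw [if_neg hj, if_neg hj]
          have hspec := (PySem.Chars.findFrom_natCast_spec s [s[i]] (i + 1) (by omega) hj).1
          exact ih m' s _ d (by omega) (by omega)
      · rw [if_neg hq, if_neg hq]
        by_cases hc : s[i] = ',' ∧ d = 0
        · rw [if_pos hc, if_pos hc]
        · rw [if_neg hc, if_neg hc]
          exact ih m' s (i + 1) _ (by omega) (by omega)
    · rw [pvTopCommaF_none _ s i d (by omega), pvTopCommaF_none _ s i d (by omega)]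

lemma pvTopCommaF_bounds : ∀ (n : Nat) {s : List Char} {i : Nat} {d : Int} {j : Nat},
    pvTopCommaF n s i d = some j → i ≤ j ∧ j < s.length := by
  intro n
  induction n with
  | zero => intro s i d j h; exact absurd h (by simp [pvTopCommaF])
  | succ n ih =>
    intro s i d j h
    rw [pvTopCommaF] at h
    by_cases hlt : i < s.length
    · rw [dif_pos hlt] at h
      by_cases hq : s[i] = '"' ∨ s[i] = '\''
      · rw [if_pos hq] at h
        by_cases hj : PySem.Chars.findFrom s [s[i]] ((i + 1 : Nat) : Int) = -1
        · rw [if_pos hj] at h; cases h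
        · rw [if_neg hj] at h
          obtain ⟨h1, h2⟩ := ih h
          have hspec := (PySem.Chars.findFrom_natCast_spec s [s[i]] (i + 1) (by omega) hj).1
          exact ⟨by omega, h2⟩
      · rw [if_neg hq] at h
        by_cases hc : s[i] = ',' ∧ d = 0
        · rw [if_pos hc] at h
          injection h with h'
          subst h'
          exact ⟨le_refl _, hlt⟩
        · rw [if_neg hc] at h
          obtain ⟨h1, h2⟩ := ih h
          exact ⟨by omega, h2⟩
    · rw [dif_neg hlt] at h; cases h

lemma pvTopComma_bounds {s : List Char} {i : Nat} {d : Int} {j : Nat}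
    (h : pvTopComma s i d = some j) : i ≤ j ∧ j < s.length :=
  pvTopCommaF_bounds _ h

/-- one-step unfolding of pvTopComma (the fuel is invisible). -/
lemma pvTopComma_eq (s : List Char) (i : Nat) (d : Int) :
    pvTopComma s i d =
      if h : i < s.length then
        if s[i] = '"' ∨ s[i] = '\'' then
          if PySem.Chars.findFrom s [s[i]] ((i + 1 : Nat) : Int) = -1 then none
          else pvTopComma s ((PySem.Chars.findFrom s [s[i]] ((i + 1 : Nat) : Int)).toNat + 1) d
        else if s[i] = ',' ∧ d = 0 then some i
        else pvTopComma s (i + 1) (if s[i] = '(' then d + 1 else if s[i] = ')' then d - 1 else d)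
      else none := by
  by_cases hlt : i < s.length
  · rw [dif_pos hlt]
    unfold pvTopComma
    obtain ⟨k, hk⟩ : ∃ k, s.length - i = k + 1 := ⟨s.length - i - 1, by omega⟩
    rw [hk, pvTopCommaF, dif_pos hlt]
    by_cases hq : s[i] = '"' ∨ s[i] = '\''
    · rw [if_pos hq, if_pos hq]
      by_cases hj : PySem.Chars.findFrom s [s[i]] ((i + 1 : Nat) : Int) = -1
      · rw [if_pos hj, if_pos hj]
      · rw [if_neg hj, if_neg hj]
        have hspec := (PySem.Chars.findFrom_natCast_spec s [s[i]] (i + 1) (by omega) hj).1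
        exact pvTopCommaF_fuel k _ s _ d (by omega) (by omega)
    · rw [if_neg hq, if_neg hq]
      by_cases hc : s[i] = ',' ∧ d = 0
      · rw [if_pos hc, if_pos hc]
      · rw [if_neg hc, if_neg hc]
        exact pvTopCommaF_fuel k _ s (i + 1) _ (by omega) (by omega)
  · rw [dif_neg hlt]
    unfold pvTopComma
    rw [show s.length - i = 0 from by omega]
    rfl

/-- bridge: pvSegs of the suffix from i equals the head found by pvTopComma plus the rest. -/
lemma pvTop_segs (s : List Char) :
    ∀ (n i : Nat) (d : Int) (cur : List Char), s.length - i ≤ n →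
    pvSegs (s.drop i) cur d none =
      (match pvTopComma s i d with
       | none => [cur ++ s.drop i]
       | some j => (cur ++ (s.drop i).take (j - i)) :: pvSegs (s.drop (j + 1)) [] 0 none) := by
  intro n
  induction n with
  | zero =>
    intro i d cur hn
    have hge : ¬ i < s.length := by omega
    rw [pvTopComma_eq, dif_neg hge]
    simp [List.drop_eq_nil_of_le (by omega : s.length ≤ i), pvSegs]
  | succ n ih =>
    intro i d cur hn
    by_cases h : i < s.length
    · have hdrop : s.drop i = s[i] :: s.drop (i + 1) := List.drop_eq_getElem_cons h
      by_cases hq : s[i] = '"' ∨ s[i] = '\''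
      · -- quote: skip to the matching quote (or to the end)
        by_cases hj : PySem.Chars.findFrom s [s[i]] ((i + 1 : Nat) : Int) = -1
        · rw [pvTopComma_eq, dif_pos h, if_pos hq, if_pos hj]
          have hnm := pvFind_none s s[i] i (by omega) hj
          rw [hdrop]
          simp only [pvSegs, if_pos hq]
          rw [pvSegs_quote_all _ _ _ _ hnm]
          simp
        · obtain ⟨u, v, hsplit, hcu, hlen⟩ := pvFind_decomp s s[i] i (by omega) hj
          set m := (PySem.Chars.findFrom s [s[i]] ((i + 1 : Nat) : Int)).toNat with hm
          have hvd : s.drop (m + 1) = v := by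
            have : s.drop (m + 1) = (s.drop (i + 1)).drop (u.length + 1) := by
              rw [List.drop_drop]; congr 1; omega
            rw [this, hsplit]
            simp [List.drop_append]
          have hstep : pvTopComma s i d = pvTopComma s (m + 1) d := by
            rw [pvTopComma_eq, dif_pos h, if_pos hq, if_neg hj, ← hm]
          have hlhs : pvSegs (s.drop i) cur d none
              = pvSegs (s.drop (m + 1)) (cur ++ [s[i]] ++ u ++ [s[i]]) d none := by
            rw [hdrop]
            simp only [pvSegs, if_pos hq]
            rw [hsplit, pvSegs_quote_skip u s[i] v (cur ++ [s[i]]) d hcu, hvd]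
          have hmlt : m + 1 ≤ s.length ∨ True := Or.inr trivial
          rw [hlhs, ih (m + 1) d (cur ++ [s[i]] ++ u ++ [s[i]]) (by omega), hstep]
          have htake : ∀ k, m + 1 ≤ k →
              cur ++ [s[i]] ++ u ++ [s[i]] ++ (s.drop (m + 1)).take (k - (m + 1))
                = cur ++ (s.drop i).take (k - i) := by
            intro k hk
            have hki : k - i = (u.length + 2) + (k - (m + 1)) := by omega
            rw [hki, List.take_add]
            have h1 : (s.drop i).take (u.length + 2) = s[i] :: u ++ [s[i]] := by
              rw [hdrop, hsplit, show u.length + 2 = (u.length + 1) + 1 from rfl,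
                List.take_succ_cons, List.take_append]
              simp
            have h2 : (s.drop i).drop (u.length + 2) = s.drop (m + 1) := by
              rw [List.drop_drop]; congr 1; omega
            rw [h1, h2]
            simp
          cases hpt : pvTopComma s (m + 1) d with
          | none =>
            simp only []
            rw [hvd, hdrop, hsplit]
            simp
          | some j2 =>
            have hb := pvTopComma_bounds hpt
            simp only []
            rw [htake j2 hb.1]
      · rw [pvTopComma_eq, dif_pos h, if_neg hq]
        by_cases hcomma : s[i] = ',' ∧ d = 0
        · -- split here
          rw [hdrop]
          have hnp : ¬ s[i] = '(' := by rw [hcomma.1]; decide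
          have hnq : ¬ s[i] = ')' := by rw [hcomma.1]; decide
          simp only [pvSegs, if_neg hq, if_neg hnp, if_neg hnq, if_pos hcomma]
          simp [hcomma.2]
        · -- ordinary char: advance one, possibly adjusting depth
          set d' := if s[i] = '(' then d + 1 else if s[i] = ')' then d - 1 else d with hd'
          have hlhs : pvSegs (s.drop i) cur d none
              = pvSegs (s.drop (i + 1)) (cur ++ [s[i]]) d' none := by
            rw [hdrop]
            by_cases hp : s[i] = '('
            · simp [pvSegs, hp, hd']
            · by_cases hr : s[i] = ')'
              · simp [pvSegs, hr, hd']
              · simp [pvSegs, hq, hp, hr, hcomma, hd']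
          rw [if_neg hcomma, hlhs, ih (i + 1) d' (cur ++ [s[i]]) (by omega)]
          cases hpt : pvTopComma s (i + 1) d' with
          | none =>
            simp only []
            rw [hdrop]
            simp only [List.append_assoc, List.cons_append, List.nil_append]
          | some j2 =>
            have hb := pvTopComma_bounds hpt
            simp only []
            have : cur ++ [s[i]] ++ (s.drop (i + 1)).take (j2 - (i + 1))
                = cur ++ (s.drop i).take (j2 - i) := by
              have hki : j2 - i = 1 + (j2 - (i + 1)) := by omega
              rw [hki, List.take_add, hdrop]
              simp only [List.take_succ_cons, List.take_zero, List.drop_succ_cons, List.drop_zero,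
                List.append_assoc, List.cons_append, List.nil_append]
            rw [this]
    · have hge : ¬ i < s.length := h
      rw [pvTopComma_eq, dif_neg hge]
      simp [List.drop_eq_nil_of_le (by omega : s.length ≤ i), pvSegs]

/-- B computes the strip-filtered segments (any fuel beyond the length). -/
lemma pvSplitBF_segs : ∀ (n : Nat) (s : List Char), s.length < n →
    pvSplitBF n s = (pvSegs s [] 0 none).filterMap pvStripNE := by
  intro n
  induction n with
  | zero => intro s hs; exact absurd hs (Nat.not_lt_zero _)
  | succ n ihn =>
    intro s hs
    cases hpt : pvTopComma s 0 0 with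
    | none =>
      have hseg := pvTop_segs s s.length 0 0 [] (by omega)
      rw [hpt] at hseg
      simp only [List.drop_zero, List.nil_append] at hseg
      rw [pvSplitBF, hpt, hseg]
      by_cases hne : PySem.Chars.strip s = [] <;> simp [pvStripNE, hne]
    | some i =>
      have hb := pvTopComma_bounds hpt
      have hseg := pvTop_segs s s.length 0 0 [] (by omega)
      rw [hpt] at hseg
      simp only [List.drop_zero, Nat.sub_zero, List.nil_append] at hseg
      have hrec := ihn (s.drop (i + 1)) (by simp; omega)
      rw [pvSplitBF, hpt, hseg, List.filterMap_cons]
      show (if PySem.Chars.strip (s.take i) ≠ [] then [String.ofList (PySem.Chars.strip (s.take i))] else [])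
            ++ pvSplitBF n (s.drop (i + 1)) = _
      rw [hrec]
      by_cases hne : PySem.Chars.strip (s.take i) = [] <;> simp [pvStripNE, hne]

-- ===== VERDICT (by name: the statement is the Claim_ definition above) =====
theorem split_sql_columns_spec : Claim_equal_split_sql_columns := by
  intro s _
  unfold Spec_split_sql_columns split_sql_columns split_sql_columns_alt
  rw [pvSplitBF_segs (s.toList.length + 1) s.toList (by omega)]
  have hA := pvFoldA_segs s.toList [] [] 0 none
  simp only [Option.isSome_none] at hA
  simpa using hA
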